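-- pv_equiv track=rewrite | github.com/Yuning-Z8/GameTool | gametool/number.py | english_unit_numerals
-- ===== SOURCE A (Python) =====
-- def english_unit_numerals(num):
--     """将阿拉伯数字转换为英文数字
--
--     Args:
--         num: 要转换的阿拉伯数字
--
--     Returns:
--         对应的英文数字字符串
--     """
--     units = ['', 'k', 'M', 'B', 'T']
--     if num == 0:
--         return '0'
--
--     result = ''
--     for i, unit in enumerate(units):
--         if num % 1000 != 0:
--             result = f"{num % 1000}{unit} " + result
--         num //= 1000
--         if num == 0:
--             break
--     return result.strip()
-- ===== SOURCE B (Python) =====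
-- def english_unit_numerals(num):
--     """将阿拉伯数字转换为英文数字
--
--     Args:
--         num: 要转换的阿拉伯数字
--
--     Returns:
--         对应的英文数字字符串
--     """
--     if num == 0:
--         return '0'
--     units = ['T', 'B', 'M', 'k', '']
--     s = str(num % 10**15).zfill(15)
--     parts = []
--     for i in range(5):
--         group = s[3*i:3*i+3].lstrip('0')
--         if group:
--             parts.append(group + units[i])
--     return ' '.join(parts)
-- ===== Notes on version B (the rewrite author's own statement) =====
-- stated objective: alternative
-- what changed: B is textual instead of arithmetic: it renders the fifteen low decimal digits of num (all the function can ever show, obtained with one Python modulo) as a single zero-padded decimal string, slices that string into five three-character groups and left-strips zeros, where A repeatedly mutates num by floor-dividing it per thousands group with an early break, prepends formatted remainders to a string and strips a trailing space.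
import Mathlib
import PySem

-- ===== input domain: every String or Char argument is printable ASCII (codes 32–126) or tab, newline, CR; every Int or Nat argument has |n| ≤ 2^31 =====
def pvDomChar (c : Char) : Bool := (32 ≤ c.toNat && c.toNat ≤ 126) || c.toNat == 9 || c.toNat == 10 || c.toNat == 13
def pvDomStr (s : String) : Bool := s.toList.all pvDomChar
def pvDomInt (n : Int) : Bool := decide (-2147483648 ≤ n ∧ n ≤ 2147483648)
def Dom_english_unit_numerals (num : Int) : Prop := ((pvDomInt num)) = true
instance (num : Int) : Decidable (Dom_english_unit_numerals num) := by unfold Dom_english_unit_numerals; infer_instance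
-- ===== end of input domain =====

-- B is a textual algorithm: it renders num % 10**15 (the 15 low decimal digits, which are all the
-- function can ever show) as a zero-padded 15-character decimal string, slices it into five
-- 3-character groups and left-strips zeros, instead of A's destructive num //= 1000 loop with an
-- early break, string prepending and a final strip (objective: alternative).

-- ===== PORT A =====
-- the for-loop of A: state is (remaining units, num, result); `break` = early return
def euLoop : List String → Int → String → String
  | [], _, result => result
  | unit :: rest, num, result =>
    let result' := if PySem.Int.mod num 1000 ≠ 0
      then PySem.Int.toStr (PySem.Int.mod num 1000) ++ unit ++ " " ++ result
      else result
    let num' := PySem.Int.floordiv num 1000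
    if num' = 0 then result' else euLoop rest num' result'

def english_unit_numerals (num : Int) : String :=
  let units := ["", "k", "M", "B", "T"]
  if num = 0 then "0"
  else PySem.Str.strip (euLoop units num "")

-- ===== PORT B =====
-- one iteration of B's for-loop over i (s is the 15-character string computed before the loop);
-- s[3*i:3*i+3].lstrip('0') is ported exactly as dropWhile (· == '0') on the slice
-- (lstrip with the single-character set '0' drops exactly the leading '0's)
def bStep (s : List Char) (acc : List (List Char)) (i : Int) : List (List Char) :=
  let group := (PySem.List.slice s (some (3*i)) (some (3*i+3))).dropWhile (· == '0')
  if group ≠ [] then acc ++ [group ++ (PySem.List.pyGet? [['T'], ['B'], ['M'], ['k'], []] i).getD []] else acc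

def english_unit_numerals_alt (num : Int) : String :=
  if num = 0 then "0"
  else
    let s := PySem.Chars.zfill (PySem.Int.toChars (PySem.Int.mod num ((10:Int)^15))) 15
    let parts := (PySem.List.pyRange 0 5 1).foldl (bStep s) []
    String.ofList (PySem.Chars.join [' '] parts)

-- ===== PRECONDITION & SPEC =====
def Spec_english_unit_numerals (num : Int) (out : String) : Prop := out = english_unit_numerals_alt num
instance (num : Int) (out : String) : Decidable (Spec_english_unit_numerals num out) := by unfold Spec_english_unit_numerals; infer_instance

-- ===== CLAIM (what is proved, stated in full; the proofs are below) =====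
def Claim_equal_english_unit_numerals : Prop := ∀ (num : Int), Dom_english_unit_numerals num → Spec_english_unit_numerals num (english_unit_numerals num)

-- ===== LEMMAS AND PROOFS =====

-- the i-th 3-digit group of num, Python semantics
def cc (a : Int) (i : Nat) : Int := PySem.Int.mod (PySem.Int.floordiv a ((1000 : Int) ^ i)) 1000

def unitChars : Nat → List Char
  | 1 => ['k'] | 2 => ['M'] | 3 => ['B'] | 4 => ['T'] | _ => []

-- the nonzero groups of a at the positions `is`, rendered as char lists
def pieces (a : Int) (is : List Nat) : List (List Char) :=
  is.filterMap (fun i =>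
    if cc a i ≠ 0 then some (PySem.Int.toChars (cc a i) ++ unitChars i) else none)

lemma fd_fd (a : Int) (i : Nat) :
    PySem.Int.floordiv (PySem.Int.floordiv a ((1000 : Int) ^ i)) 1000
      = PySem.Int.floordiv a ((1000 : Int) ^ (i + 1)) := by
  simp only [PySem.Int.floordiv_eq_ediv_of_pos (show (0 : Int) < 1000 by norm_num),
    PySem.Int.floordiv_eq_ediv_of_pos (show (0 : Int) < (1000 : Int) ^ i by positivity),
    PySem.Int.floordiv_eq_ediv_of_pos (show (0 : Int) < (1000 : Int) ^ (i + 1) by positivity)]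
  rw [Int.ediv_ediv_of_nonneg (by positivity), pow_succ]

lemma cc_zero (a : Int) (i : Nat) (h : PySem.Int.floordiv a ((1000 : Int) ^ i) = 0) :
    cc a i = 0 := by
  unfold cc; rw [h]; decide

lemma fd_zero_succ (a : Int) (i : Nat) (h : PySem.Int.floordiv a ((1000 : Int) ^ i) = 0) :
    PySem.Int.floordiv a ((1000 : Int) ^ (i + 1)) = 0 := by
  rw [← fd_fd, h]; decide

def okPiece (b : List Char) : Prop := b ≠ [] ∧ ∀ c ∈ b, PySem.Chars.isspace c = false

set_option maxRecDepth 8192 in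
lemma toDigits_ok : ∀ m : Nat, m < 1000 →
    Nat.toDigits 10 m ≠ [] ∧ (Nat.toDigits 10 m).all (fun ch => !PySem.Chars.isspace ch) := by
  decide

lemma toChars_ok (c : Int) (h1 : 0 < c) (h2 : c < 1000) : okPiece (PySem.Int.toChars c) := by
  have hc : PySem.Int.toChars c = Nat.toDigits 10 c.toNat := by
    unfold PySem.Int.toChars
    rw [if_neg (by omega)]
  obtain ⟨hne, hall⟩ := toDigits_ok c.toNat (by omega)
  refine ⟨by rw [hc]; exact hne, ?_⟩
  intro ch hch
  rw [hc] at hch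
  simpa using List.all_eq_true.mp hall ch hch

lemma unitChars_nospace (i : Nat) : ∀ c ∈ unitChars i, PySem.Chars.isspace c = false := by
  rcases i with _ | _ | _ | _ | _ | i <;> simp [unitChars] <;> decide

lemma pieces_ok (a : Int) (is : List Nat) : ∀ p ∈ pieces a is, okPiece p := by
  intro p hp
  unfold pieces at hp
  obtain ⟨i, _, hi⟩ := List.mem_filterMap.mp hp
  by_cases hc : cc a i ≠ 0
  · rw [if_pos hc] at hi
    obtain rfl := Option.some_injective _ hi
    have h0 : (0 : Int) < 1000 := by norm_num
    have hnn := PySem.Int.mod_nonneg (PySem.Int.floordiv a ((1000 : Int) ^ i)) h0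
    have hlt := PySem.Int.mod_lt (PySem.Int.floordiv a ((1000 : Int) ^ i)) h0
    have hok := toChars_ok (cc a i)
      (by unfold cc; unfold cc at hc; omega) (by unfold cc; exact hlt)
    refine ⟨by simp [hok.1], ?_⟩
    intro c hcmem
    rcases List.mem_append.mp hcmem with h | h
    · exact hok.2 c h
    · exact unitChars_nospace i c h
  · rw [if_neg hc] at hi; exact absurd hi (by simp)

lemma pieces_cons (a : Int) (i : Nat) (is : List Nat) :
    pieces a (i :: is) =
      (if cc a i ≠ 0 then [PySem.Int.toChars (cc a i) ++ unitChars i] else []) ++ pieces a is := by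
  unfold pieces
  by_cases hc : cc a i ≠ 0 <;> simp [hc]

-- string-side lemmas
lemma lstrip_cons_nonspace (c : Char) (xs : List Char) (h : PySem.Chars.isspace c = false) :
    PySem.Chars.lstrip (c :: xs) = c :: xs := by
  simp [PySem.Chars.lstrip, h]

lemma rstrip_append_space (xs : List Char) :
    PySem.Chars.rstrip (xs ++ [' ']) = PySem.Chars.rstrip xs := by
  unfold PySem.Chars.rstrip
  rw [List.reverse_append]
  simp [show PySem.Chars.isspace ' ' = true from by decide]

lemma rstrip_no_space (xs : List Char) (h : ∀ c ∈ xs, PySem.Chars.isspace c = false) :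
    PySem.Chars.rstrip xs = xs := by
  unfold PySem.Chars.rstrip
  rcases hr : xs.reverse with _ | ⟨c, t⟩
  · have hx : xs = [] := by simpa using congrArg List.reverse hr
    simp [hx]
  · have hc : PySem.Chars.isspace c = false := by
      apply h
      have : c ∈ xs.reverse := by rw [hr]; exact List.mem_cons_self
      simpa using this
    rw [List.dropWhile_cons]
    simp only [hc, Bool.false_eq_true, if_false]
    simpa using congrArg List.reverse hr.symm

lemma rstrip_append_of_ne_nil (xs ys : List Char) (h : PySem.Chars.rstrip ys ≠ []) :
    PySem.Chars.rstrip (xs ++ ys) = xs ++ PySem.Chars.rstrip ys := by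
  unfold PySem.Chars.rstrip at *
  rw [List.reverse_append, List.dropWhile_append]
  have hne : ¬ (List.dropWhile PySem.Chars.isspace ys.reverse).isEmpty = true := by
    intro hemp
    exact h (by simp [List.isEmpty_iff.mp hemp])
  rw [if_neg hne]
  simp

lemma rstrip_flatten (bs : List (List Char)) (h : ∀ b ∈ bs, okPiece b) :
    PySem.Chars.rstrip ((bs.map (· ++ [' '])).flatten) = PySem.Chars.join [' '] bs := by
  induction bs with
  | nil => decide
  | cons b rest ih =>
    have hb := h b (by simp)
    have hrest : ∀ x ∈ rest, okPiece x := fun x hx => h x (by simp [hx])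
    rcases rest with _ | ⟨b2, rest2⟩
    · simp only [List.map_cons, List.map_nil, List.flatten_cons, List.flatten_nil,
        List.append_nil]
      rw [rstrip_append_space, rstrip_no_space b hb.2, PySem.Chars.join_singleton]
    · have hjoin := ih hrest
      have hb2 := hrest b2 (by simp)
      have hjne : PySem.Chars.join [' '] (b2 :: rest2) ≠ [] := by
        rcases rest2 with _ | ⟨b3, rest3⟩
        · rw [PySem.Chars.join_singleton]; exact hb2.1
        · rw [PySem.Chars.join_cons_cons]
          intro hcontra
          exact hb2.1 (by simpa using (List.append_eq_nil_iff.mp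
            (List.append_eq_nil_iff.mp hcontra).1).1)
      have hfl : ((b :: b2 :: rest2).map (· ++ [' '])).flatten
          = (b ++ [' ']) ++ ((b2 :: rest2).map (· ++ [' '])).flatten := by
        simp
      rw [hfl, rstrip_append_of_ne_nil _ _ (by rw [hjoin]; exact hjne), hjoin,
        PySem.Chars.join_cons_cons]

lemma strip_flatten (bs : List (List Char)) (h : ∀ b ∈ bs, okPiece b) :
    PySem.Chars.strip ((bs.map (· ++ [' '])).flatten) = PySem.Chars.join [' '] bs := by
  rcases bs with _ | ⟨b, rest⟩
  · decide
  · have hb := h b (by simp)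
    rcases hbe : b with _ | ⟨c, t⟩
    · exact absurd hbe hb.1
    subst hbe
    unfold PySem.Chars.strip
    have hfl : (((c :: t) :: rest).map (· ++ [' '])).flatten
        = c :: (t ++ [' '] ++ (rest.map (· ++ [' '])).flatten) := by
      simp
    rw [hfl, lstrip_cons_nonspace c _ (hb.2 c (by simp)), ← hfl]
    exact rstrip_flatten _ h

lemma toList_piece (c : Int) (u acc : String) :
    (PySem.Int.toStr c ++ u ++ " " ++ acc).toList
      = (PySem.Int.toChars c ++ u.toList ++ [' ']) ++ acc.toList := by
  have hsp : (" " : String).toList = [' '] := by decide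
  simp [String.toList_append, PySem.Int.toList_toStr, hsp]

-- ===== A-side: euLoop computes the concatenation of the nonzero groups =====
lemma euLoop_step4 (a : Int) (acc : String) :
    (euLoop ["T"] (PySem.Int.floordiv a ((1000 : Int) ^ 4)) acc).toList
      = ((pieces a [4]).map (· ++ [' '])).flatten ++ acc.toList := by
  have hstep : euLoop ["T"] (PySem.Int.floordiv a ((1000 : Int) ^ 4)) acc
      = if PySem.Int.floordiv (PySem.Int.floordiv a ((1000 : Int) ^ 4)) 1000 = 0
        then (if PySem.Int.mod (PySem.Int.floordiv a ((1000 : Int) ^ 4)) 1000 ≠ 0 then PySem.Int.toStr (PySem.Int.mod (PySem.Int.floordiv a ((1000 : Int) ^ 4)) 1000) ++ "T" ++ " " ++ acc else acc) else (if PySem.Int.mod (PySem.Int.floordiv a ((1000 : Int) ^ 4)) 1000 ≠ 0 then PySem.Int.toStr (PySem.Int.mod (PySem.Int.floordiv a ((1000 : Int) ^ 4)) 1000) ++ "T" ++ " " ++ acc else acc) := rfl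
  rw [hstep, ite_self, show PySem.Int.mod (PySem.Int.floordiv a ((1000 : Int) ^ 4)) 1000 = cc a 4 from rfl]
  by_cases hc : cc a 4 ≠ 0
  · rw [if_pos hc, toList_piece]
    simp [pieces, hc, show ("T" : String).toList = ['T'] from by decide, unitChars]
  · rw [if_neg hc]
    simp [pieces, hc]

lemma euLoop_step3 (a : Int) (acc : String) :
    (euLoop ["B", "T"] (PySem.Int.floordiv a ((1000 : Int) ^ 3)) acc).toList
      = ((pieces a [4, 3]).map (· ++ [' '])).flatten ++ acc.toList := by
  have hstep : euLoop ["B", "T"] (PySem.Int.floordiv a ((1000 : Int) ^ 3)) acc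
      = if PySem.Int.floordiv (PySem.Int.floordiv a ((1000 : Int) ^ 3)) 1000 = 0
        then (if PySem.Int.mod (PySem.Int.floordiv a ((1000 : Int) ^ 3)) 1000 ≠ 0 then PySem.Int.toStr (PySem.Int.mod (PySem.Int.floordiv a ((1000 : Int) ^ 3)) 1000) ++ "B" ++ " " ++ acc else acc)
        else euLoop ["T"] (PySem.Int.floordiv (PySem.Int.floordiv a ((1000 : Int) ^ 3)) 1000) (if PySem.Int.mod (PySem.Int.floordiv a ((1000 : Int) ^ 3)) 1000 ≠ 0 then PySem.Int.toStr (PySem.Int.mod (PySem.Int.floordiv a ((1000 : Int) ^ 3)) 1000) ++ "B" ++ " " ++ acc else acc) := rfl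
  have hfd : PySem.Int.floordiv (PySem.Int.floordiv a ((1000 : Int) ^ 3)) 1000
      = PySem.Int.floordiv a ((1000 : Int) ^ 4) := fd_fd a 3
  rw [hstep, hfd, show PySem.Int.mod (PySem.Int.floordiv a ((1000 : Int) ^ 3)) 1000 = cc a 3 from rfl]
  by_cases h0 : PySem.Int.floordiv a ((1000 : Int) ^ 4) = 0
  · rw [if_pos h0]
    have hz4 : cc a 4 = 0 := cc_zero a 4 h0
    rw [show pieces a [4, 3] = pieces a [3] from by
      simp [pieces, hz4]]
    by_cases hc : cc a 3 ≠ 0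
    · rw [if_pos hc, toList_piece]
      simp [pieces, hc, show ("B" : String).toList = ['B'] from by decide, unitChars]
    · rw [if_neg hc]
      simp [pieces, hc]
  · rw [if_neg h0, euLoop_step4 a _]
    have hsplit : pieces a [4, 3] = pieces a [4] ++ pieces a [3] := by
      unfold pieces; rw [show ([4, 3] : List Nat) = [4] ++ [3] from rfl, List.filterMap_append]
    by_cases hc : cc a 3 ≠ 0
    · rw [if_pos hc, toList_piece, hsplit]
      simp [pieces, hc, show ("B" : String).toList = ['B'] from by decide, unitChars]
    · rw [if_neg hc, hsplit]
      simp [pieces, hc]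

lemma euLoop_step2 (a : Int) (acc : String) :
    (euLoop ["M", "B", "T"] (PySem.Int.floordiv a ((1000 : Int) ^ 2)) acc).toList
      = ((pieces a [4, 3, 2]).map (· ++ [' '])).flatten ++ acc.toList := by
  have hstep : euLoop ["M", "B", "T"] (PySem.Int.floordiv a ((1000 : Int) ^ 2)) acc
      = if PySem.Int.floordiv (PySem.Int.floordiv a ((1000 : Int) ^ 2)) 1000 = 0
        then (if PySem.Int.mod (PySem.Int.floordiv a ((1000 : Int) ^ 2)) 1000 ≠ 0 then PySem.Int.toStr (PySem.Int.mod (PySem.Int.floordiv a ((1000 : Int) ^ 2)) 1000) ++ "M" ++ " " ++ acc else acc)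
        else euLoop ["B", "T"] (PySem.Int.floordiv (PySem.Int.floordiv a ((1000 : Int) ^ 2)) 1000) (if PySem.Int.mod (PySem.Int.floordiv a ((1000 : Int) ^ 2)) 1000 ≠ 0 then PySem.Int.toStr (PySem.Int.mod (PySem.Int.floordiv a ((1000 : Int) ^ 2)) 1000) ++ "M" ++ " " ++ acc else acc) := rfl
  have hfd : PySem.Int.floordiv (PySem.Int.floordiv a ((1000 : Int) ^ 2)) 1000
      = PySem.Int.floordiv a ((1000 : Int) ^ 3) := fd_fd a 2
  rw [hstep, hfd, show PySem.Int.mod (PySem.Int.floordiv a ((1000 : Int) ^ 2)) 1000 = cc a 2 from rfl]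
  by_cases h0 : PySem.Int.floordiv a ((1000 : Int) ^ 3) = 0
  · rw [if_pos h0]
    have hz3 : cc a 3 = 0 := cc_zero a 3 h0
    have hf3 : PySem.Int.floordiv a ((1000 : Int) ^ 4) = 0 := fd_zero_succ a 3 h0
    have hz4 : cc a 4 = 0 := cc_zero a 4 hf3
    rw [show pieces a [4, 3, 2] = pieces a [2] from by
      simp [pieces, hz3, hz4]]
    by_cases hc : cc a 2 ≠ 0
    · rw [if_pos hc, toList_piece]
      simp [pieces, hc, show ("M" : String).toList = ['M'] from by decide, unitChars]
    · rw [if_neg hc]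
      simp [pieces, hc]
  · rw [if_neg h0, euLoop_step3 a _]
    have hsplit : pieces a [4, 3, 2] = pieces a [4, 3] ++ pieces a [2] := by
      unfold pieces; rw [show ([4, 3, 2] : List Nat) = [4, 3] ++ [2] from rfl, List.filterMap_append]
    by_cases hc : cc a 2 ≠ 0
    · rw [if_pos hc, toList_piece, hsplit]
      simp [pieces, hc, show ("M" : String).toList = ['M'] from by decide, unitChars]
    · rw [if_neg hc, hsplit]
      simp [pieces, hc]

lemma euLoop_step1 (a : Int) (acc : String) :
    (euLoop ["k", "M", "B", "T"] (PySem.Int.floordiv a ((1000 : Int) ^ 1)) acc).toList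
      = ((pieces a [4, 3, 2, 1]).map (· ++ [' '])).flatten ++ acc.toList := by
  have hstep : euLoop ["k", "M", "B", "T"] (PySem.Int.floordiv a ((1000 : Int) ^ 1)) acc
      = if PySem.Int.floordiv (PySem.Int.floordiv a ((1000 : Int) ^ 1)) 1000 = 0
        then (if PySem.Int.mod (PySem.Int.floordiv a ((1000 : Int) ^ 1)) 1000 ≠ 0 then PySem.Int.toStr (PySem.Int.mod (PySem.Int.floordiv a ((1000 : Int) ^ 1)) 1000) ++ "k" ++ " " ++ acc else acc)
        else euLoop ["M", "B", "T"] (PySem.Int.floordiv (PySem.Int.floordiv a ((1000 : Int) ^ 1)) 1000) (if PySem.Int.mod (PySem.Int.floordiv a ((1000 : Int) ^ 1)) 1000 ≠ 0 then PySem.Int.toStr (PySem.Int.mod (PySem.Int.floordiv a ((1000 : Int) ^ 1)) 1000) ++ "k" ++ " " ++ acc else acc) := rfl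
  have hfd : PySem.Int.floordiv (PySem.Int.floordiv a ((1000 : Int) ^ 1)) 1000
      = PySem.Int.floordiv a ((1000 : Int) ^ 2) := fd_fd a 1
  rw [hstep, hfd, show PySem.Int.mod (PySem.Int.floordiv a ((1000 : Int) ^ 1)) 1000 = cc a 1 from rfl]
  by_cases h0 : PySem.Int.floordiv a ((1000 : Int) ^ 2) = 0
  · rw [if_pos h0]
    have hz2 : cc a 2 = 0 := cc_zero a 2 h0
    have hf2 : PySem.Int.floordiv a ((1000 : Int) ^ 3) = 0 := fd_zero_succ a 2 h0
    have hz3 : cc a 3 = 0 := cc_zero a 3 hf2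
    have hf3 : PySem.Int.floordiv a ((1000 : Int) ^ 4) = 0 := fd_zero_succ a 3 hf2
    have hz4 : cc a 4 = 0 := cc_zero a 4 hf3
    rw [show pieces a [4, 3, 2, 1] = pieces a [1] from by
      simp [pieces, hz2, hz3, hz4]]
    by_cases hc : cc a 1 ≠ 0
    · rw [if_pos hc, toList_piece]
      simp [pieces, hc, show ("k" : String).toList = ['k'] from by decide, unitChars]
    · rw [if_neg hc]
      simp [pieces, hc]
  · rw [if_neg h0, euLoop_step2 a _]
    have hsplit : pieces a [4, 3, 2, 1] = pieces a [4, 3, 2] ++ pieces a [1] := by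
      unfold pieces; rw [show ([4, 3, 2, 1] : List Nat) = [4, 3, 2] ++ [1] from rfl, List.filterMap_append]
    by_cases hc : cc a 1 ≠ 0
    · rw [if_pos hc, toList_piece, hsplit]
      simp [pieces, hc, show ("k" : String).toList = ['k'] from by decide, unitChars]
    · rw [if_neg hc, hsplit]
      simp [pieces, hc]

lemma euLoop_top (a : Int) (acc : String) :
    (euLoop ["", "k", "M", "B", "T"] a acc).toList
      = ((pieces a [4, 3, 2, 1, 0]).map (· ++ [' '])).flatten ++ acc.toList := by
  have hstep : euLoop ["", "k", "M", "B", "T"] a acc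
      = if PySem.Int.floordiv a 1000 = 0
        then (if PySem.Int.mod a 1000 ≠ 0 then PySem.Int.toStr (PySem.Int.mod a 1000) ++ "" ++ " " ++ acc else acc)
        else euLoop ["k", "M", "B", "T"] (PySem.Int.floordiv a 1000)
          (if PySem.Int.mod a 1000 ≠ 0 then PySem.Int.toStr (PySem.Int.mod a 1000) ++ "" ++ " " ++ acc else acc) := rfl
  have h1 : PySem.Int.floordiv a ((1000 : Int) ^ 0) = a := by
    rw [pow_zero, PySem.Int.floordiv_eq_ediv_of_pos (by norm_num), Int.ediv_one]
  have hfd : PySem.Int.floordiv a 1000 = PySem.Int.floordiv a ((1000 : Int) ^ 1) := by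
    rw [← fd_fd a 0, h1]
  have hmod : PySem.Int.mod a 1000 = cc a 0 := by unfold cc; rw [h1]
  rw [hstep, hfd, hmod]
  by_cases h0 : PySem.Int.floordiv a ((1000 : Int) ^ 1) = 0
  · rw [if_pos h0]
    have hz1 : cc a 1 = 0 := cc_zero a 1 h0
    have hf1 : PySem.Int.floordiv a ((1000 : Int) ^ 2) = 0 := fd_zero_succ a 1 h0
    have hz2 : cc a 2 = 0 := cc_zero a 2 hf1
    have hf2 : PySem.Int.floordiv a ((1000 : Int) ^ 3) = 0 := fd_zero_succ a 2 hf1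
    have hz3 : cc a 3 = 0 := cc_zero a 3 hf2
    have hf3 : PySem.Int.floordiv a ((1000 : Int) ^ 4) = 0 := fd_zero_succ a 3 hf2
    have hz4 : cc a 4 = 0 := cc_zero a 4 hf3
    rw [show pieces a [4, 3, 2, 1, 0] = pieces a [0] from by
      simp [pieces, hz1, hz2, hz3, hz4]]
    by_cases hc : cc a 0 ≠ 0
    · rw [if_pos hc, toList_piece]
      simp [pieces, hc, show ("" : String).toList = [] from by decide, unitChars]
    · rw [if_neg hc]
      simp [pieces, hc]
  · rw [if_neg h0, euLoop_step1 a _]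
    have hsplit : pieces a [4, 3, 2, 1, 0] = pieces a [4, 3, 2, 1] ++ pieces a [0] := by
      unfold pieces
      rw [show ([4, 3, 2, 1, 0] : List Nat) = [4, 3, 2, 1] ++ [0] from rfl, List.filterMap_append]
    by_cases hc : cc a 0 ≠ 0
    · rw [if_pos hc, toList_piece, hsplit]
      simp [pieces, hc, show ("" : String).toList = [] from by decide, unitChars]
    · rw [if_neg hc, hsplit]
      simp [pieces, hc]

-- ===== B-side: digit-string structure =====

-- Nat.toDigits is the reversed digit list rendered with digitChar
lemma toDigitsCore_eq_digits (f : Nat) : ∀ (n : Nat) (ds : List Char), 0 < n → n < 10 ^ f →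
    Nat.toDigitsCore 10 f n ds = ((Nat.digits 10 n).map Nat.digitChar).reverse ++ ds := by
  induction f with
  | zero => intro n ds h1 h2; simp at h2; omega
  | succ f ih =>
    intro n ds h1 h2
    rw [Nat.toDigitsCore]
    rw [Nat.digits_def' (by norm_num : (1:Nat) < 10) h1]
    by_cases hq : n / 10 = 0
    · simp [hq, Nat.digits_zero]
    · rw [if_neg hq, ih (n / 10) _ (Nat.pos_of_ne_zero hq)
        (by rw [Nat.div_lt_iff_lt_mul (by norm_num)]; calc n < 10 ^ (f+1) := h2
            _ = 10 ^ f * 10 := by ring)]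
      simp

lemma toDigits_eq_digits (n : Nat) (h : 0 < n) :
    Nat.toDigits 10 n = ((Nat.digits 10 n).map Nat.digitChar).reverse := by
  unfold Nat.toDigits
  rw [toDigitsCore_eq_digits (n + 1) n [] h
    (lt_of_lt_of_le (Nat.lt_pow_self (by norm_num)) (Nat.pow_le_pow_right (by norm_num) (by omega)))]
  simp

-- the little-endian digit list of m padded with zeros to length k
def pd (m k : Nat) : List Nat := Nat.digits 10 m ++ List.replicate (k - (Nat.digits 10 m).length) 0

-- a 3-digit group rendered as characters (leading zeros included)
def padC (c : Nat) : List Char := ((pd c 3).map Nat.digitChar).reverse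

lemma length_pd (m k : Nat) (h : m < 10 ^ k) : (pd m k).length = k := by
  have hle : (Nat.digits 10 m).length ≤ k := (Nat.digits_length_le_iff (by norm_num) m).mpr h
  simp [pd]; omega

lemma pd_split (a b m : Nat) (h : m < 10 ^ (a + b)) :
    pd m (a + b) = pd (m % 10 ^ a) a ++ pd (m / 10 ^ a) b := by
  have hra : m % 10 ^ a < 10 ^ a := Nat.mod_lt _ (by positivity)
  have hlenr : (Nat.digits 10 (m % 10 ^ a)).length ≤ a :=
    (Nat.digits_length_le_iff (by norm_num) _).mpr hra
  by_cases hq : m / 10 ^ a = 0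
  · have hm : m < 10 ^ a := (Nat.div_eq_zero_iff_lt (by positivity)).mp hq
    have hmm : m % 10 ^ a = m := Nat.mod_eq_of_lt hm
    have hlen : (Nat.digits 10 m).length ≤ a :=
      (Nat.digits_length_le_iff (by norm_num) m).mpr hm
    rw [hq, hmm]
    simp only [pd, Nat.digits_zero]
    rw [show a + b - (Nat.digits 10 m).length = (a - (Nat.digits 10 m).length) + b by omega,
      List.replicate_add]
    simp
  · have hqpos : 0 < m / 10 ^ a := Nat.pos_of_ne_zero hq
    have key := Nat.digits_append_zeroes_append_digits
      (b := 10) (k := a - (Nat.digits 10 (m % 10 ^ a)).length)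
      (m := m / 10 ^ a) (n := m % 10 ^ a) (by norm_num) hqpos
    rw [show (Nat.digits 10 (m % 10 ^ a)).length + (a - (Nat.digits 10 (m % 10 ^ a)).length) = a
      by omega] at key
    rw [show m % 10 ^ a + 10 ^ a * (m / 10 ^ a) = m from Nat.mod_add_div m (10 ^ a)] at key
    have hqb : m / 10 ^ a < 10 ^ b := by
      rw [Nat.div_lt_iff_lt_mul (by positivity)]
      calc m < 10 ^ (a + b) := h
        _ = 10 ^ b * 10 ^ a := by rw [← pow_add, Nat.add_comm]
    have hlq : (Nat.digits 10 (m / 10 ^ a)).length ≤ b :=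
      (Nat.digits_length_le_iff (by norm_num) _).mpr hqb
    have hlm : (Nat.digits 10 m).length = a + (Nat.digits 10 (m / 10 ^ a)).length := by
      rw [← key]; simp; omega
    simp only [pd, ← key]
    have hlen2 : (Nat.digits 10 (m % 10 ^ a) ++ List.replicate (a - (Nat.digits 10 (m % 10 ^ a)).length) 0
        ++ Nat.digits 10 (m / 10 ^ a)).length = a + (Nat.digits 10 (m / 10 ^ a)).length := by
      simp
      omega
    rw [hlen2, show a + b - (a + (Nat.digits 10 (m / 10 ^ a)).length)
        = b - (Nat.digits 10 (m / 10 ^ a)).length by omega]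
    simp [List.append_assoc]

-- zfill of str(m) is the reversed padded digit list
lemma zfill_pd (m k : Nat) (h1 : 0 < m) (h2 : m < 10 ^ k) :
    PySem.Chars.zfill (Nat.toDigits 10 m) (k : Int) = ((pd m k).map Nat.digitChar).reverse := by
  have htd := toDigits_eq_digits m h1
  have hne : Nat.digits 10 m ≠ [] := Nat.digits_ne_nil_iff_ne_zero.mpr (by omega)
  have hlen : (Nat.digits 10 m).length ≤ k := (Nat.digits_length_le_iff (by norm_num) m).mpr h2
  have hlentd : (Nat.toDigits 10 m).length = (Nat.digits 10 m).length := by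
    rw [htd]; simp
  -- the head of toDigits is a digit character, never '+' or '-'
  obtain ⟨d, t, hdt⟩ : ∃ d t, (Nat.digits 10 m).reverse = d :: t := by
    rcases hr : (Nat.digits 10 m).reverse with _ | ⟨d, t⟩
    · exact absurd (by simpa using congrArg List.reverse hr) hne
    · exact ⟨d, t, rfl⟩
  have hd10 : d < 10 := Nat.digits_lt_base (by norm_num) (by
    have : d ∈ (Nat.digits 10 m).reverse := by rw [hdt]; exact List.mem_cons_self
    simpa using this)
  have hhead : Nat.toDigits 10 m = Nat.digitChar d :: t.map Nat.digitChar := by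
    rw [htd, ← List.map_reverse, hdt, List.map_cons]
  have hnosign : ¬ (Nat.digitChar d = '+' ∨ Nat.digitChar d = '-') := by
    interval_cases d <;> decide
  unfold PySem.Chars.zfill
  by_cases hw : (k : Int) ≤ ((Nat.toDigits 10 m).length : Int)
  · rw [if_pos hw]
    have hke : (Nat.digits 10 m).length = k := by
      rw [hlentd] at hw; omega
    simp [pd, hke, htd]
  · rw [if_neg hw, hhead]
    simp only [if_neg hnosign]
    rw [← hhead]
    have htn : ((k : Int)).toNat = k := by omega
    rw [htn, hlentd]
    simp only [pd, List.map_append, List.map_replicate, List.reverse_append,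
      List.reverse_replicate]
    rw [htd]
    simp [Nat.digitChar]

-- left-stripping '0' from a padded group recovers str(chunk), or nothing for a zero chunk
lemma dropWhile_padC (c : Nat) (hc : c < 1000) :
    (padC c).dropWhile (· == '0') = if c = 0 then [] else Nat.toDigits 10 c := by
  by_cases h : c = 0
  · subst h; decide
  · rw [if_neg h]
    have hpos : 0 < c := Nat.pos_of_ne_zero h
    have hne : Nat.digits 10 c ≠ [] := Nat.digits_ne_nil_iff_ne_zero.mpr h
    obtain ⟨d, t, hdt⟩ : ∃ d t, (Nat.digits 10 c).reverse = d :: t := by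
      rcases hr : (Nat.digits 10 c).reverse with _ | ⟨d, t⟩
      · exact absurd (by simpa using congrArg List.reverse hr) hne
      · exact ⟨d, t, rfl⟩
    have hd10 : d < 10 := Nat.digits_lt_base (by norm_num) (by
      have : d ∈ (Nat.digits 10 c).reverse := by rw [hdt]; exact List.mem_cons_self
      simpa using this)
    have hd0 : d ≠ 0 := by
      have hgl := Nat.getLast_digit_ne_zero 10 (m := c) h
      rw [List.getLast_eq_head_reverse] at hgl
      simp only [hdt, List.head_cons] at hgl
      exact hgl
    have hpadC : padC c
        = List.replicate (3 - (Nat.digits 10 c).length) '0'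
          ++ (Nat.digitChar d :: t.map Nat.digitChar) := by
      unfold padC pd
      rw [List.map_append, List.reverse_append, List.map_replicate, List.reverse_replicate,
        ← List.map_reverse, hdt, List.map_cons]
      simp [Nat.digitChar]
    have hpd : (Nat.digitChar d == '0') = false := by
      interval_cases d
      · exact absurd rfl hd0
      all_goals decide
    rw [hpadC, List.dropWhile_append, List.dropWhile_replicate]
    simp only [show (('0' == '0') = true) from rfl, List.isEmpty_nil, if_pos]
    rw [List.dropWhile_cons]
    simp only [hpd, Bool.false_eq_true, if_false]
    rw [toDigits_eq_digits c hpos, ← List.map_reverse, hdt, List.map_cons]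

-- str of a nonnegative chunk
lemma toChars_natCast (c : Nat) : PySem.Int.toChars (c : Int) = Nat.toDigits 10 c := by
  unfold PySem.Int.toChars
  rw [if_neg (by omega)]
  simp

lemma toDigits_ne_nil (c : Nat) (h : 0 < c) : Nat.toDigits 10 c ≠ [] := by
  rw [toDigits_eq_digits c h]
  simp [Nat.digits_ne_nil_iff_ne_zero]
  omega

-- the zero-padded 15-character string is the five padded 3-digit groups, most significant first
lemma s_split (m : Nat) (h1 : 0 < m) (h2 : m < 10 ^ 15) :
    PySem.Chars.zfill (Nat.toDigits 10 m) (15 : Int)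
      = padC (m / 10 ^ 12) ++ (padC (m / 10 ^ 9 % 10 ^ 3) ++ (padC (m / 10 ^ 6 % 10 ^ 3)
        ++ (padC (m / 10 ^ 3 % 10 ^ 3) ++ padC (m % 10 ^ 3)))) := by
  have h15 : ((15 : Nat) : Int) = (15 : Int) := by norm_num
  rw [← h15, zfill_pd m 15 h1 h2]
  have e1 : pd m 15 = pd (m % 10 ^ 3) 3 ++ pd (m / 10 ^ 3) 12 := by
    have := pd_split 3 12 m (by norm_num; exact lt_of_lt_of_le h2 (by norm_num))
    simpa using this
  have hu1 : m / 10 ^ 3 < 10 ^ 12 := by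
    rw [Nat.div_lt_iff_lt_mul (by norm_num)]
    calc m < 10 ^ 15 := h2
      _ = 10 ^ 12 * 10 ^ 3 := by norm_num
  have e2 : pd (m / 10 ^ 3) 12
      = pd (m / 10 ^ 3 % 10 ^ 3) 3 ++ pd (m / 10 ^ 6) 9 := by
    have := pd_split 3 9 (m / 10 ^ 3) (by norm_num; exact lt_of_lt_of_le hu1 (by norm_num))
    rw [Nat.div_div_eq_div_mul] at this
    norm_num at this ⊢
    exact this
  have hu2 : m / 10 ^ 6 < 10 ^ 9 := by
    rw [Nat.div_lt_iff_lt_mul (by norm_num)]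
    calc m < 10 ^ 15 := h2
      _ = 10 ^ 9 * 10 ^ 6 := by norm_num
  have e3 : pd (m / 10 ^ 6) 9
      = pd (m / 10 ^ 6 % 10 ^ 3) 3 ++ pd (m / 10 ^ 9) 6 := by
    have := pd_split 3 6 (m / 10 ^ 6) (by norm_num; exact lt_of_lt_of_le hu2 (by norm_num))
    rw [Nat.div_div_eq_div_mul] at this
    norm_num at this ⊢
    exact this
  have hu3 : m / 10 ^ 9 < 10 ^ 6 := by
    rw [Nat.div_lt_iff_lt_mul (by norm_num)]
    calc m < 10 ^ 15 := h2
      _ = 10 ^ 6 * 10 ^ 9 := by norm_num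
  have e4 : pd (m / 10 ^ 9) 6
      = pd (m / 10 ^ 9 % 10 ^ 3) 3 ++ pd (m / 10 ^ 12) 3 := by
    have := pd_split 3 3 (m / 10 ^ 9) (by norm_num; exact lt_of_lt_of_le hu3 (by norm_num))
    rw [Nat.div_div_eq_div_mul] at this
    norm_num at this ⊢
    exact this
  rw [e1, e2, e3, e4]
  simp only [padC, List.map_append, List.reverse_append, List.append_assoc]

-- chunks of A's integer agree with the decimal chunks of m = num % 10^15
lemma cc_eq_chunk (num : Int) (j : Nat) (hj : j ≤ 4) :
    cc num j = (((PySem.Int.mod num ((10 : Int) ^ 15)).toNat / 1000 ^ j % 1000 : Nat) : Int) := by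
  rw [PySem.Int.mod_eq_emod_of_pos (show (0:Int) < (10:Int)^15 by norm_num)]
  set q : Int := num / (10 : Int) ^ 15 with hqdef
  set M : Int := num % (10 : Int) ^ 15 with hMdef
  have hM0 : 0 ≤ M := Int.emod_nonneg num (by norm_num)
  have hMc : ((M.toNat : Int)) = M := Int.toNat_of_nonneg hM0
  have hq : num = M + (10 : Int) ^ 15 * q := by
    rw [hMdef, hqdef]
    linarith [Int.mul_ediv_add_emod num ((10 : Int) ^ 15)]
  have hpow : ((10 : Int) ^ 15) = (1000 : Int) ^ j * (1000 : Int) ^ (5 - j) := by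
    rw [← pow_add, show j + (5 - j) = 5 by omega]
    norm_num
  have hnum : num = M + (1000 : Int) ^ j * ((1000 : Int) ^ (5 - j) * q) := by
    calc num = M + (10 : Int) ^ 15 * q := hq
      _ = M + (1000 : Int) ^ j * ((1000 : Int) ^ (5 - j) * q) := by rw [hpow]; ring
  unfold cc
  rw [PySem.Int.floordiv_eq_ediv_of_pos (by positivity),
    PySem.Int.mod_eq_emod_of_pos (by norm_num)]
  rw [hnum, Int.add_mul_ediv_left M _ (show ((1000 : Int) ^ j) ≠ 0 by positivity)]
  rw [show (1000 : Int) ^ (5 - j) = 1000 * 1000 ^ (4 - j) by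
      rw [show (5 - j) = (4 - j) + 1 by omega, pow_succ'],
    mul_assoc, Int.add_mul_emod_self_left]
  conv_lhs => rw [← hMc]
  rw [Int.natCast_mod, Int.natCast_div]
  push_cast
  ring_nf

-- ===== VERDICT (by name: the statement is the Claim_ definition above) =====
theorem english_unit_numerals_spec : Claim_equal_english_unit_numerals := by
  intro num hdom
  unfold Spec_english_unit_numerals english_unit_numerals english_unit_numerals_alt
  by_cases h : num = 0
  · simp [h]
  · rw [if_neg h, if_neg h]
    have hmM : PySem.Int.mod num ((10 : Int) ^ 15) = num % (10 : Int) ^ 15 :=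
      PySem.Int.mod_eq_emod_of_pos (by norm_num)
    set m : Nat := (PySem.Int.mod num ((10 : Int) ^ 15)).toNat with hmdef
    have hM0 : 0 ≤ PySem.Int.mod num ((10 : Int) ^ 15) := by
      rw [hmM]; exact Int.emod_nonneg num (by norm_num)
    have hMlt : PySem.Int.mod num ((10 : Int) ^ 15) < (10 : Int) ^ 15 := by
      rw [hmM]; exact Int.emod_lt_of_pos num (by norm_num)
    have hmlt : m < 10 ^ 15 := by
      rw [hmdef]
      omega
    have hm0 : 0 < m := by
      rcases Nat.eq_zero_or_pos m with hz | hp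
      · exfalso
        have hMz : PySem.Int.mod num ((10 : Int) ^ 15) = 0 := by omega
        rw [hmM] at hMz
        obtain ⟨c, hc⟩ := Int.dvd_of_emod_eq_zero hMz
        have hb : -2147483648 ≤ num ∧ num ≤ 2147483648 := by
          simpa [Dom_english_unit_numerals, pvDomInt] using hdom
        have hc0 : c = 0 := by
          rw [hc] at hb
          omega
        exact h (by rw [hc, hc0, mul_zero])
      · exact hp
    have htc : PySem.Int.toChars (PySem.Int.mod num ((10 : Int) ^ 15)) = Nat.toDigits 10 m := by
      unfold PySem.Int.toChars
      rw [if_neg (by omega), hmdef]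
    -- the five decimal chunks of m
    have hc4lt : m / 10 ^ 12 < 1000 := by
      rw [Nat.div_lt_iff_lt_mul (by norm_num)]
      calc m < 10 ^ 15 := hmlt
        _ = 1000 * 10 ^ 12 := by norm_num
    -- the padded string splits into 3-char groups
    have hs : PySem.Chars.zfill (Nat.toDigits 10 m) (15 : Int)
        = padC (m / 10 ^ 12) ++ (padC (m / 10 ^ 9 % 10 ^ 3) ++ (padC (m / 10 ^ 6 % 10 ^ 3)
          ++ (padC (m / 10 ^ 3 % 10 ^ 3) ++ padC (m % 10 ^ 3)))) := s_split m hm0 hmlt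
    have hlen : ∀ c : Nat, c < 1000 → (padC c).length = 3 := by
      intro c hc
      have := length_pd c 3 (by norm_num; omega)
      simp [padC, this]
    have hL4 := hlen _ hc4lt
    have hL3 := hlen (m / 10 ^ 9 % 10 ^ 3) (by have := Nat.mod_lt (m / 10 ^ 9) (show 0 < 10 ^ 3 by norm_num); omega)
    have hL2 := hlen (m / 10 ^ 6 % 10 ^ 3) (by have := Nat.mod_lt (m / 10 ^ 6) (show 0 < 10 ^ 3 by norm_num); omega)
    have hL1 := hlen (m / 10 ^ 3 % 10 ^ 3) (by have := Nat.mod_lt (m / 10 ^ 3) (show 0 < 10 ^ 3 by norm_num); omega)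
    have hL0 := hlen (m % 10 ^ 3) (by have := Nat.mod_lt m (show 0 < 10 ^ 3 by norm_num); omega)
    apply String.toList_inj.mp
    rw [PySem.Str.toList_strip]
    simp only [String.toList_ofList]
    rw [euLoop_top num ""]
    simp only [show ("" : String).toList = [] from by decide, List.append_nil]
    rw [strip_flatten _ (pieces_ok num [4, 3, 2, 1, 0])]
    congr 1
    -- parts = pieces
    rw [htc]
    rw [show PySem.List.pyRange 0 5 1 = [0, 1, 2, 3, 4] from by decide]
    simp only [List.foldl_cons, List.foldl_nil]
    set s := PySem.Chars.zfill (Nat.toDigits 10 m) (15 : Int) with hsdef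
    -- the slice of s at position i is the padded group of chunk 4-i
    have hsl0 : PySem.List.slice s (some (3 * 0)) (some (3 * 0 + 3)) = padC (m / 10 ^ 12) := by
      rw [PySem.List.slice_toNat _ (by norm_num) (by norm_num),
        show Int.toNat (3 * 0 + 3) - Int.toNat (3 * 0) = 3 from rfl,
        show Int.toNat (3 * 0) = 0 from rfl, List.drop_zero, hs, List.take_left' hL4]
    have hsl1 : PySem.List.slice s (some (3 * 1)) (some (3 * 1 + 3)) = padC (m / 10 ^ 9 % 10 ^ 3) := by
      rw [PySem.List.slice_toNat _ (by norm_num) (by norm_num),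
        show Int.toNat (3 * 1 + 3) - Int.toNat (3 * 1) = 3 from rfl,
        show Int.toNat (3 * 1) = 3 from rfl, hs, List.drop_left' hL4, List.take_left' hL3]
    have hsl2 : PySem.List.slice s (some (3 * 2)) (some (3 * 2 + 3)) = padC (m / 10 ^ 6 % 10 ^ 3) := by
      rw [PySem.List.slice_toNat _ (by norm_num) (by norm_num),
        show Int.toNat (3 * 2 + 3) - Int.toNat (3 * 2) = 3 from rfl,
        show Int.toNat (3 * 2) = 3 + 3 from rfl, ← List.drop_drop, hs,
        List.drop_left' hL4, List.drop_left' hL3, List.take_left' hL2]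
    have hsl3 : PySem.List.slice s (some (3 * 3)) (some (3 * 3 + 3)) = padC (m / 10 ^ 3 % 10 ^ 3) := by
      rw [PySem.List.slice_toNat _ (by norm_num) (by norm_num),
        show Int.toNat (3 * 3 + 3) - Int.toNat (3 * 3) = 3 from rfl,
        show Int.toNat (3 * 3) = 3 + (3 + 3) from rfl, ← List.drop_drop, ← List.drop_drop, hs,
        List.drop_left' hL4, List.drop_left' hL3, List.drop_left' hL2, List.take_left' hL1]
    have hsl4 : PySem.List.slice s (some (3 * 4)) (some (3 * 4 + 3)) = padC (m % 10 ^ 3) := by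
      rw [PySem.List.slice_toNat _ (by norm_num) (by norm_num),
        show Int.toNat (3 * 4 + 3) - Int.toNat (3 * 4) = 3 from rfl,
        show Int.toNat (3 * 4) = 3 + (3 + (3 + 3)) from rfl, ← List.drop_drop, ← List.drop_drop,
        ← List.drop_drop, hs, List.drop_left' hL4, List.drop_left' hL3, List.drop_left' hL2,
        List.drop_left' hL1, List.take_of_length_le (le_of_eq hL0)]
    -- the chunks, in A's form
    have hcc : ∀ j : Nat, j ≤ 4 → cc num j = ((m / 1000 ^ j % 1000 : Nat) : Int) := by
      intro j hj
      rw [cc_eq_chunk num j hj, hmdef]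
    -- one B step appends exactly the piece for chunk 4-i
    have hstep : ∀ (acc : List (List Char)) (i : Int) (j c : Nat), j ≤ 4 →
        (PySem.List.slice s (some (3 * i)) (some (3 * i + 3))).dropWhile (· == '0')
          = (if c = 0 then [] else Nat.toDigits 10 c) →
        cc num j = ((c : Nat) : Int) →
        (PySem.List.pyGet? [['T'], ['B'], ['M'], ['k'], []] i).getD [] = unitChars j →
        bStep s acc i
          = acc ++ (if cc num j ≠ 0 then [PySem.Int.toChars (cc num j) ++ unitChars j] else []) := by
      intro acc i j c hj hgr hc hu
      unfold bStep
      rw [hgr, hu, hc]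
      by_cases hz : c = 0
      · subst hz
        simp
      · rw [if_neg hz, if_pos (toDigits_ne_nil c (Nat.pos_of_ne_zero hz)),
          if_pos (by exact_mod_cast hz), toChars_natCast]
    -- chunk identities relating 10-power and 1000-power forms
    have hch4 : m / 1000 ^ 4 % 1000 = m / 10 ^ 12 := by
      rw [show (1000 : Nat) ^ 4 = 10 ^ 12 by norm_num, Nat.mod_eq_of_lt hc4lt]
    have hch3 : m / 1000 ^ 3 % 1000 = m / 10 ^ 9 % 10 ^ 3 := by norm_num
    have hch2 : m / 1000 ^ 2 % 1000 = m / 10 ^ 6 % 10 ^ 3 := by norm_num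
    have hch1 : m / 1000 ^ 1 % 1000 = m / 10 ^ 3 % 10 ^ 3 := by norm_num
    have hch0 : m / 1000 ^ 0 % 1000 = m % 10 ^ 3 := by norm_num
    rw [hstep [] 0 4 (m / 1000 ^ 4 % 1000) (by norm_num)
        (by rw [hsl0, hch4, dropWhile_padC _ hc4lt]) (hcc 4 (by norm_num)) (by decide)]
    rw [hstep _ 1 3 (m / 1000 ^ 3 % 1000) (by norm_num)
        (by rw [hsl1, hch3, dropWhile_padC _ (by omega)]) (hcc 3 (by norm_num)) (by decide)]
    rw [hstep _ 2 2 (m / 1000 ^ 2 % 1000) (by norm_num)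
        (by rw [hsl2, hch2, dropWhile_padC _ (by omega)]) (hcc 2 (by norm_num)) (by decide)]
    rw [hstep _ 3 1 (m / 1000 ^ 1 % 1000) (by norm_num)
        (by rw [hsl3, hch1, dropWhile_padC _ (by omega)]) (hcc 1 (by norm_num)) (by decide)]
    rw [hstep _ 4 0 (m / 1000 ^ 0 % 1000) (by norm_num)
        (by rw [hsl4, hch0, dropWhile_padC _ (by omega)]) (hcc 0 (by norm_num)) (by decide)]
    rw [pieces_cons, pieces_cons, pieces_cons, pieces_cons, pieces_cons,
      show pieces num [] = [] from rfl]
    simp [List.append_assoc]
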